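-- pv_equiv track=rewrite | github.com/zwb0417/ACEGCN | syntax.py | find_added_content
-- ===== SOURCE A (Python) =====
-- def find_added_content(original, processed):
--     o_chars, p_chars = list(original), list(processed)
--     added, current = [], []
--     o_idx = 0
--     for i, c in enumerate(p_chars):
--         if o_idx < len(o_chars) and c == o_chars[o_idx]:
--             if current:
--                 added.append(''.join(current))
--                 current = []
--             o_idx += 1
--         else:
--             current.append(c)
--     if current:
--         added.append(''.join(current))
--     return added if added else [""]
-- ===== SOURCE B (Python) =====
-- from itertools import groupby
--
-- def find_added_content(original, processed):
--     # Pass 1: build an alignment table — for each processed char, whether it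
--     # greedily consumed the next pending original char.
--     o_chars = list(original)
--     o_idx = 0
--     flags = []
--     for c in processed:
--         if o_idx < len(o_chars) and c == o_chars[o_idx]:
--             flags.append((c, True))
--             o_idx += 1
--         else:
--             flags.append((c, False))
--     # Pass 2: group consecutive unmatched chars into run strings.
--     added = [''.join(c for c, _ in grp)
--              for matched, grp in groupby(flags, key=lambda t: t[1])
--              if not matched]
--     return added if added else ['']
-- ===== Notes on version B (the rewrite author's own statement) =====
-- stated objective: alternative
-- what changed: B splits the work into two passes: first it builds an alignment table of (char, matched) flags by the greedy pointer scan, then it reshapes that table with itertools.groupby, keeping only the joined unmatched runs, instead of A's single pass that flushes a running buffer inline.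
import Mathlib
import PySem

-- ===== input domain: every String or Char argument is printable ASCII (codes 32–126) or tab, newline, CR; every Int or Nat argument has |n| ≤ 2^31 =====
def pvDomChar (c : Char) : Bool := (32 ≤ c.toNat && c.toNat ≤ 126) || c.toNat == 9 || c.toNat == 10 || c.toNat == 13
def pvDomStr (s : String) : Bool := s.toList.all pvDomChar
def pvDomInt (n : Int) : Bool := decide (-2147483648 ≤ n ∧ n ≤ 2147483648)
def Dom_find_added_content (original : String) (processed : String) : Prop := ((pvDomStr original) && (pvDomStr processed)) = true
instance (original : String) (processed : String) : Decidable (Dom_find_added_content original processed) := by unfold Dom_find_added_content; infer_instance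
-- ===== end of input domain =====

-- B builds an alignment table of (char, matched) flags first, then groups the
-- unmatched runs, instead of A's single pass flushing a running buffer (alternative decomposition, same cost).
-- ===== PORT A =====
-- the Python for-loop over p_chars, carrying (o_idx, added, current); returns the final (added, current)
def findLoopA (o : List Char) : List Char → Nat → List String → List Char → (List String × List Char)
  | [], _, added, current => (added, current)
  | c :: cs, oidx, added, current =>
    if o[oidx]? = some c then
      (if current ≠ [] then findLoopA o cs (oidx + 1) (added ++ [String.ofList current]) []
       else findLoopA o cs (oidx + 1) added current)
    else
      findLoopA o cs oidx added (current ++ [c])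

def find_added_content (original : String) (processed : String) : List String :=
  let r := findLoopA original.toList processed.toList 0 [] []
  let added := if r.2 ≠ [] then r.1 ++ [String.ofList r.2] else r.1
  if added ≠ [] then added else [""]

-- ===== PORT B =====
-- pass 1 of Source B: the alignment table of (char, matched) flags
def alignB : List Char → List Char → List (Char × Bool)
  | _, [] => []
  | o, c :: cs =>
    match o with
    | o0 :: os => if c = o0 then (c, true) :: alignB os cs else (c, false) :: alignB o cs
    | [] => (c, false) :: alignB [] cs

-- pass 2 of Source B: groupby on the matched flag, keeping joined unmatched runs
def groupAddedB : List (Char × Bool) → List String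
  | [] => []
  | (_, true) :: rest => groupAddedB rest
  | (c, false) :: rest =>
    String.ofList (c :: (rest.takeWhile (fun t => !t.2)).map Prod.fst)
      :: groupAddedB (rest.dropWhile (fun t => !t.2))
termination_by l => l.length
decreasing_by
  · simp
  · exact Nat.lt_succ_of_le (List.length_dropWhile_le _ _)

def find_added_content_alt (original : String) (processed : String) : List String :=
  let added := groupAddedB (alignB original.toList processed.toList)
  if added ≠ [] then added else [""]

-- ===== PRECONDITION & SPEC =====
def Spec_find_added_content (original : String) (processed : String) (out : List String) : Prop := out = find_added_content_alt original processed
instance (original : String) (processed : String) (out : List String) : Decidable (Spec_find_added_content original processed out) := by unfold Spec_find_added_content; infer_instance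

-- ===== CLAIM (what is proved, stated in full; the proofs are below) =====
def Claim_equal_find_added_content : Prop := ∀ (original : String) (processed : String), Dom_find_added_content original processed → Spec_find_added_content original processed (find_added_content original processed)

-- ===== LEMMAS AND PROOFS =====

-- ===== VERDICT (by name: the statement is the Claim_ definition above) =====
-- the pending-buffer view of B's second pass, used to state the loop invariant
def groupWith (cur : List Char) : List (Char × Bool) → List String
  | [] => if cur ≠ [] then [String.ofList cur] else []
  | (_, true) :: rest => (if cur ≠ [] then [String.ofList cur] else []) ++ groupWith [] rest
  | (c, false) :: rest => groupWith (cur ++ [c]) rest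

def finishA (r : List String × List Char) : List String :=
  if r.2 ≠ [] then r.1 ++ [String.ofList r.2] else r.1

theorem alignB_drop (o : List Char) (c : Char) (cs : List Char) (oidx : Nat) :
    alignB (o.drop oidx) (c :: cs) =
      if o[oidx]? = some c then (c, true) :: alignB (o.drop (oidx + 1)) cs
      else (c, false) :: alignB (o.drop oidx) cs := by
  by_cases h : oidx < o.length
  · rw [List.drop_eq_getElem_cons h]
    by_cases hc : c = o[oidx]
    · simp [alignB, hc, List.getElem?_eq_getElem h]
    · simp [alignB, hc, List.getElem?_eq_getElem h, eq_comm]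
  · have hle : o.length ≤ oidx := Nat.le_of_not_lt h
    have hd : o.drop oidx = [] := List.drop_eq_nil_of_le hle
    simp [hd, alignB, List.getElem?_eq_none hle]

theorem loopA_group (o : List Char) (p : List Char) :
    ∀ (oidx : Nat) (added : List String) (cur : List Char),
      finishA (findLoopA o p oidx added cur) = added ++ groupWith cur (alignB (o.drop oidx) p) := by
  induction p with
  | nil =>
    intro oidx added cur
    by_cases hc : cur = [] <;> simp [findLoopA, alignB, groupWith, finishA, hc]
  | cons c cs ih =>
    intro oidx added cur
    rw [alignB_drop]
    by_cases hm : o[oidx]? = some c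
    · by_cases hc : cur = [] <;>
        simp [findLoopA, hm, hc, groupWith, ih]
    · simp [findLoopA, hm, groupWith, ih]

theorem group_comb (flags : List (Char × Bool)) :
    groupWith [] flags = groupAddedB flags ∧
      (∀ cur : List Char, cur ≠ [] →
        groupWith cur flags =
          String.ofList (cur ++ (flags.takeWhile (fun t => !t.2)).map Prod.fst)
            :: groupAddedB (flags.dropWhile (fun t => !t.2))) := by
  induction flags with
  | nil => exact ⟨by simp [groupWith, groupAddedB], fun cur hc => by simp [groupWith, groupAddedB, hc]⟩
  | cons hd rs ih =>
    obtain ⟨c, b⟩ := hd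
    cases b
    · refine ⟨?_, ?_⟩
      · have := ih.2 [c] (by simp)
        simp [groupWith, groupAddedB, this]
      · intro cur hc
        have := ih.2 (cur ++ [c]) (by simp)
        simp [groupWith, this]
    · refine ⟨?_, ?_⟩
      · simp [groupWith, groupAddedB, ih.1]
      · intro cur hc
        simp [groupWith, groupAddedB, ih.1, hc]

theorem groupWith_nil (flags : List (Char × Bool)) :
    groupWith [] flags = groupAddedB flags := (group_comb flags).1

theorem find_added_content_spec : Claim_equal_find_added_content := by
  intro original processed _
  unfold Spec_find_added_content find_added_content find_added_content_alt
  have h := loopA_group original.toList processed.toList 0 [] []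
  simp only [List.drop_zero, groupWith_nil] at h
  simp only [finishA] at h
  simp [h]
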